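-- pv_equiv track=rewrite | github.com/gregchapman-dev/converter21 | converter21/humdrum/convert.py | kernToAccidentalCount
-- ===== SOURCE A (Python) =====
-- def kernToAccidentalCount(text: str) -> int:
--     output: int = 0
--     for ch in text:
--         if ch == ' ':
--             break
--
--         if ch == '-':
--             output -= 1
--         elif ch == '#':
--             output += 1
--
--     return output
-- ===== SOURCE B (Python) =====
-- def kernToAccidentalCount(text: str) -> int:
--     head = text.partition(' ')[0]
--     return head.count('#') - head.count('-')
-- ===== Notes on version B (the rewrite author's own statement) =====
-- stated objective: faster
-- what changed: Replaces the fused per-character loop with early break by first-space prefix extraction via str.partition followed by two independent str.count passes.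
import Mathlib
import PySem

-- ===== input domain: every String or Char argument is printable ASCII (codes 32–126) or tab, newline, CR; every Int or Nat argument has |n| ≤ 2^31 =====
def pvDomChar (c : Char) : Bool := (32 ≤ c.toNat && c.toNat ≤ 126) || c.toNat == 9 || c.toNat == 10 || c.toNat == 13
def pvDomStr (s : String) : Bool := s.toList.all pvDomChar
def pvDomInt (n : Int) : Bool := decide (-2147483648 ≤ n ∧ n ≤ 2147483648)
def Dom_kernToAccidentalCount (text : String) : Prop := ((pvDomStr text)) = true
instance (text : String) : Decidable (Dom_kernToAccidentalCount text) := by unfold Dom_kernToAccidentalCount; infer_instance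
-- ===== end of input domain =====

-- B replaces A's fused break-loop by prefix extraction (partition) plus two count passes; objective: faster (constant factor, measured).

-- ===== PORT A =====
-- the loop with its early break, as structural recursion over the characters
def kernALoop : List Char → Int → Int
  | [], acc => acc
  | c :: rest, acc =>
    if c = ' ' then acc
    else kernALoop rest (if c = '-' then acc - 1 else if c = '#' then acc + 1 else acc)

def kernToAccidentalCount (text : String) : Int := kernALoop text.toList 0

-- ===== PORT B =====
-- text.partition(' ')[0] is the prefix before the first ' '; for a single-character
-- separator this is exactly takeWhile (· ≠ ' ') — exact on all inputs.
def kernToAccidentalCount_alt (text : String) : Int :=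
  let head := text.toList.takeWhile (fun c => c ≠ ' ')
  (head.count '#' : Int) - (head.count '-' : Int)

-- ===== PRECONDITION & SPEC =====
def Spec_kernToAccidentalCount (text : String) (out : Int) : Prop := out = kernToAccidentalCount_alt text
instance (text : String) (out : Int) : Decidable (Spec_kernToAccidentalCount text out) := by unfold Spec_kernToAccidentalCount; infer_instance

-- ===== CLAIM (what is proved, stated in full; the proofs are below) =====
def Claim_equal_kernToAccidentalCount : Prop := ∀ (text : String), Dom_kernToAccidentalCount text → Spec_kernToAccidentalCount text (kernToAccidentalCount text)

-- ===== LEMMAS AND PROOFS =====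
theorem kernALoop_eq (l : List Char) : ∀ acc : Int,
    kernALoop l acc =
      acc + (((l.takeWhile (fun c => c ≠ ' ')).count '#' : Int)
           - ((l.takeWhile (fun c => c ≠ ' ')).count '-' : Int)) := by
  induction l with
  | nil => intro acc; simp [kernALoop]
  | cons c rest ih =>
    intro acc
    by_cases hsp : c = ' '
    · subst hsp; simp [kernALoop]
    · by_cases hm : c = '-'
      · subst hm
        simp [kernALoop, ih]
        ring
      · by_cases hh : c = '#'
        · subst hh
          simp [kernALoop, ih]
          ring
        · simp [kernALoop, hsp, hm, hh, ih]

-- ===== VERDICT (by name: the statement is the Claim_ definition above) =====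
theorem kernToAccidentalCount_spec : Claim_equal_kernToAccidentalCount := by
  intro text _
  unfold Spec_kernToAccidentalCount kernToAccidentalCount kernToAccidentalCount_alt
  simp [kernALoop_eq]
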